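-- pv_equiv track=rewrite | github.com/vibeforge1111/vibeship-spark-intelligence | scripts/spark_alpha_replay_arena.py | consecutive_promotion_wins
-- ===== SOURCE A (Python) =====
-- from typing import Any, Dict, Iterable, List, Mapping, Optional
--
-- def consecutive_promotion_wins(rows: Iterable[Mapping[str, Any]]) -> int:
--     streak = 0
--     for row in reversed(list(rows)):
--         if bool(row.get("promotion_gate_pass")):
--             streak += 1
--             continue
--         break
--     return int(streak)
-- ===== SOURCE B (Python) =====
-- def consecutive_promotion_wins(rows):
--     streak = 0
--     for row in rows:
--         if bool(row.get("promotion_gate_pass")):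
--             streak += 1
--         else:
--             streak = 0
--     return int(streak)
-- ===== Notes on version B (the rewrite author's own statement) =====
-- stated objective: simpler
-- what changed: Forward single pass with a reset-on-failure counter instead of materialising the list, reversing it and breaking at the first failure.
import Mathlib
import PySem

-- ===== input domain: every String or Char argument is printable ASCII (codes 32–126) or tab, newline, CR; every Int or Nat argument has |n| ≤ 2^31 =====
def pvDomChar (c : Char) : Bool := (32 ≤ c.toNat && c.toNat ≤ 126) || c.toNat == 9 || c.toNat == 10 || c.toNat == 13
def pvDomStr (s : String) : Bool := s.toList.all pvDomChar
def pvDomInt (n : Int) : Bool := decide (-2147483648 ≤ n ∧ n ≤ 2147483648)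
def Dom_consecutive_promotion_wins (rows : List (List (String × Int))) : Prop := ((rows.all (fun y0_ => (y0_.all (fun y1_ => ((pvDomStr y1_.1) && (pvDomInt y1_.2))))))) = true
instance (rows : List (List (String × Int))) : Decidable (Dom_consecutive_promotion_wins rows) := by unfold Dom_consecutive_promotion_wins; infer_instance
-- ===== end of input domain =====

-- One honest line: B scans forward with a reset-on-failure counter instead of reversing and breaking; same O(n), simpler.

-- ===== PORT A =====
-- truthiness of row.get("promotion_gate_pass"): missing key -> None -> False; int value -> value != 0
def pvGateTruthy (row : List (String × Int)) : Bool :=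
  match PySem.Dict.get? (PySem.Dict.mk row) "promotion_gate_pass" with
  | some v => v != 0
  | none => false

-- the 'for row in reversed(...)' loop with break: accumulator streak
def pvALoop (streak : Int) : List (List (String × Int)) → Int
  | [] => streak
  | r :: rest => if pvGateTruthy r then pvALoop (streak + 1) rest else streak

def consecutive_promotion_wins (rows : List (List (String × Int))) : Int :=
  pvALoop 0 rows.reverse

-- ===== PORT B =====
def consecutive_promotion_wins_alt (rows : List (List (String × Int))) : Int :=
  rows.foldl (fun streak r => if pvGateTruthy r then streak + 1 else 0) 0

-- ===== PRECONDITION & SPEC =====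
def Spec_consecutive_promotion_wins (rows : List (List (String × Int))) (out : Int) : Prop := out = consecutive_promotion_wins_alt rows
instance (rows : List (List (String × Int))) (out : Int) : Decidable (Spec_consecutive_promotion_wins rows out) := by unfold Spec_consecutive_promotion_wins; infer_instance

-- ===== CLAIM (what is proved, stated in full; the proofs are below) =====
def Claim_equal_consecutive_promotion_wins : Prop := ∀ (rows : List (List (String × Int))), Dom_consecutive_promotion_wins rows → Spec_consecutive_promotion_wins rows (consecutive_promotion_wins rows)

-- ===== LEMMAS AND PROOFS =====

theorem pvTakeWhile_append_of_all {α : Type} (p : α → Bool) (xs ys : List α)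
    (h : xs.all p = true) : (xs ++ ys).takeWhile p = xs ++ ys.takeWhile p := by
  have hx : xs.takeWhile p = xs := List.takeWhile_eq_self_iff.mpr (by simpa [List.all_eq_true] using h)
  rw [List.takeWhile_append, hx]
  simp

theorem pvTakeWhile_append_of_not_all {α : Type} (p : α → Bool) (xs ys : List α)
    (h : ¬ xs.all p = true) : (xs ++ ys).takeWhile p = xs.takeWhile p := by
  rw [List.takeWhile_append, if_neg]
  intro hlen
  exact h (by
    have hx : xs.takeWhile p = xs := (List.takeWhile_prefix p).eq_of_length hlen
    simpa [List.all_eq_true] using List.takeWhile_eq_self_iff.mp hx)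

theorem pvALoop_eq (xs : List (List (String × Int))) : ∀ s : Int,
    pvALoop s xs = s + ((xs.takeWhile pvGateTruthy).length : Int) := by
  induction xs with
  | nil => intro s; simp [pvALoop]
  | cons r rest ih =>
      intro s
      by_cases h : pvGateTruthy r = true
      · simp [pvALoop, h, ih]; ring
      · simp [pvALoop, h, List.takeWhile_cons_of_neg (by simpa using h)]

theorem pvBLoop_eq (xs : List (List (String × Int))) : ∀ s : Int,
    xs.foldl (fun streak r => if pvGateTruthy r then streak + 1 else 0) s =
      if xs.all pvGateTruthy then s + (xs.length : Int)
      else ((xs.reverse.takeWhile pvGateTruthy).length : Int) := by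
  induction xs with
  | nil => intro s; simp
  | cons r rest ih =>
      intro s
      by_cases h : pvGateTruthy r = true
      · by_cases hall : rest.all pvGateTruthy = true
        · simp [List.foldl_cons, h, ih, hall]; ring
        · have hrev : ¬ rest.reverse.all pvGateTruthy = true := by
            simpa [List.all_reverse] using hall
          have htw : (rest.reverse ++ [r]).takeWhile pvGateTruthy =
              rest.reverse.takeWhile pvGateTruthy := by
            exact pvTakeWhile_append_of_not_all _ _ _ hrev
          simp [List.foldl_cons, h, ih, hall, htw]
      · by_cases hall : rest.all pvGateTruthy = true
        · have : (rest.reverse ++ [r]).takeWhile pvGateTruthy = rest.reverse := by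
            rw [pvTakeWhile_append_of_all _ _ _ (by simpa [List.all_reverse] using hall)]
            simp [List.takeWhile_cons_of_neg (by simpa using h)]
          simp [List.foldl_cons, h, ih, hall, this]
        · have hrev : ¬ rest.reverse.all pvGateTruthy = true := by
            simpa [List.all_reverse] using hall
          have htw : (rest.reverse ++ [r]).takeWhile pvGateTruthy =
              rest.reverse.takeWhile pvGateTruthy :=
            pvTakeWhile_append_of_not_all _ _ _ hrev
          simp [List.foldl_cons, h, ih, hall, htw]

-- ===== VERDICT (by name: the statement is the Claim_ definition above) =====
theorem consecutive_promotion_wins_spec : Claim_equal_consecutive_promotion_wins := by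
  intro rows _
  unfold Spec_consecutive_promotion_wins consecutive_promotion_wins consecutive_promotion_wins_alt
  rw [pvALoop_eq, pvBLoop_eq]
  by_cases hall : rows.all pvGateTruthy = true
  · rw [if_pos hall]
    have : rows.reverse.takeWhile pvGateTruthy = rows.reverse :=
      List.takeWhile_eq_self_iff.mpr (by simpa [List.all_reverse, List.all_eq_true] using hall)
    simp [this]
  · rw [if_neg hall]
    simp
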